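-- pv_equiv track=rewrite | github.com/MrMasterDoosh/Music | ApproachableMusic/ui/components.py | _build_root_order
-- ===== SOURCE A (Python) =====
-- def _build_root_order(notes):
--     if not notes:
--         return []
--     circle_order = ['C', 'G', 'D', 'A', 'E', 'B', 'F#', 'C#', 'G#', 'D#', 'A#', 'F']
--     ordered = [note for note in circle_order if note in notes]
--     for note in notes:
--         if note not in ordered:
--             ordered.append(note)
--     return ordered
-- ===== SOURCE B (Python) =====
-- def _build_root_order(notes):
--     circle_order = ['C', 'G', 'D', 'A', 'E', 'B', 'F#', 'C#', 'G#', 'D#', 'A#', 'F']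
--     unique = list(dict.fromkeys(notes))
--     return sorted(unique, key=lambda n: circle_order.index(n) if n in circle_order else len(circle_order))
-- ===== Notes on version B (the rewrite author's own statement) =====
-- stated objective: faster
-- what changed: B deduplicates with dict.fromkeys and does one stable sort by circle-of-fifths index (non-circle notes keyed to len(circle)), replacing A's circle-filter pass plus a loop whose 'note not in ordered' membership test rescans the growing output list.
import Mathlib
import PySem

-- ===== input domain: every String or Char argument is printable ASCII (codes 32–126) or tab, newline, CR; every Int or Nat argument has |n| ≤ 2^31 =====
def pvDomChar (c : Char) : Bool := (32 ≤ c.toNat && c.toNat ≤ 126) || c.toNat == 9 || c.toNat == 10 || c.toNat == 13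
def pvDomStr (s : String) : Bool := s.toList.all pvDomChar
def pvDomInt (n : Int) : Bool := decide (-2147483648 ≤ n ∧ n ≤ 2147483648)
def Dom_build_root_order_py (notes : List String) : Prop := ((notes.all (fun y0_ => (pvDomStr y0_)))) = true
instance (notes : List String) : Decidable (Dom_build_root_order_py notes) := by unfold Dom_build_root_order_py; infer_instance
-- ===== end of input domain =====

-- B replaces A's circle-filter pass plus quadratic membership-append loop by dict.fromkeys
-- dedup and one stable sort keyed by circle-of-fifths index (same results, measured faster).

-- ===== PORT A =====
-- the circle-of-fifths list shared by both versions
def pvCircle : List String := ["C", "G", "D", "A", "E", "B", "F#", "C#", "G#", "D#", "A#", "F"]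

def build_root_order_py (notes : List String) : List String :=
  if notes.isEmpty then []
  else
    let ordered := pvCircle.filter (fun note => notes.contains note)
    notes.foldl (fun ordered note => if ordered.contains note then ordered else ordered ++ [note])
      ordered

-- ===== PORT B =====
-- sort key `circle_order.index(n) if n in circle_order else len(circle_order)`:
-- index? is some exactly when n is in pvCircle, so the conditional is its getD.
def pvKey (n : String) : Nat := (PySem.List.index? pvCircle n).getD pvCircle.length

def build_root_order_py_alt (notes : List String) : List String :=
  let unique := PySem.List.dedup notes
  PySem.List.sorted unique pvKey

-- ===== PRECONDITION & SPEC =====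
def Spec_build_root_order_py (notes : List String) (out : List String) : Prop := out = build_root_order_py_alt notes
instance (notes : List String) (out : List String) : Decidable (Spec_build_root_order_py notes out) := by unfold Spec_build_root_order_py; infer_instance

-- ===== CLAIM (what is proved, stated in full; the proofs are below) =====
def Claim_equal_build_root_order_py : Prop := ∀ (notes : List String), Dom_build_root_order_py notes → Spec_build_root_order_py notes (build_root_order_py notes)

-- ===== LEMMAS AND PROOFS =====

-- A's loop body
def pvStep (acc : List String) (n : String) : List String :=
  if acc.contains n then acc else acc ++ [n]

-- first-occurrence dedup, by structural recursion (proof-side normal form)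
def pvDD : List String → List String
  | [] => []
  | x :: xs => x :: pvDD (xs.filter (fun y => !(y == x)))
  termination_by xs => xs.length
  decreasing_by simpa using Nat.lt_succ_of_le ((List.length_filter_le _ _).trans (by simp))

-- the common normal form of both programs
def pvTarget (u : List String) : List String :=
  pvCircle.filter (fun c => u.contains c) ++ u.filter (fun n => !pvCircle.contains n)

lemma foldl_pvStep (xs : List String) : ∀ acc,
    xs.foldl pvStep acc = acc ++ pvDD (xs.filter (fun n => !acc.contains n)) := by
  induction xs with
  | nil =>
    intro acc
    simp only [List.foldl_nil, List.filter_nil]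
    rw [pvDD, List.append_nil]
  | cons x t ih =>
    intro acc
    by_cases h : acc.contains x = true
    · have hs : pvStep acc x = acc := by unfold pvStep; rw [if_pos h]
      rw [List.foldl_cons, hs, ih acc, List.filter_cons_of_neg (by simp; exact List.contains_iff_mem.mp h)]
    · have hb : acc.contains x = false := by simpa using h
      have hs : pvStep acc x = acc ++ [x] := by unfold pvStep; rw [if_neg h]
      rw [List.foldl_cons, hs, ih (acc ++ [x]),
        List.filter_cons_of_pos (by simp; exact fun hm => h (List.contains_iff_mem.mpr hm))]
      rw [pvDD, List.filter_filter, List.append_assoc]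
      have hp : List.filter (fun n => !(acc ++ [x]).contains n) t =
          List.filter (fun a => (!(a == x)) && !acc.contains a) t := by
        apply List.filter_congr
        intro n _
        by_cases he : n = x
        · subst he; simp
        · simp [he]
      rw [hp]
      rfl

lemma pvDD_filter (p : String → Bool) : ∀ (n : Nat) (xs : List String), xs.length ≤ n →
    pvDD (xs.filter p) = (pvDD xs).filter p := by
  intro n
  induction n with
  | zero =>
    intro xs h
    have : xs = [] := List.eq_nil_of_length_eq_zero (Nat.le_zero.mp h)
    subst this
    simp only [List.filter_nil]
    rw [pvDD]
    simp
  | succ n ihn =>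
    intro xs h
    match xs with
    | [] =>
      simp only [List.filter_nil]
      rw [pvDD]
      simp
    | x :: t =>
      have ht : t.length ≤ n := by simpa using h
      have hf : (t.filter (fun y => !(y == x))).length ≤ n :=
        (List.length_filter_le _ _).trans ht
      by_cases hx : p x = true
      · rw [List.filter_cons_of_pos hx, pvDD, pvDD, List.filter_cons_of_pos hx]
        congr 1
        rw [← ihn _ hf]
        apply congrArg pvDD
        rw [List.filter_filter, List.filter_filter]
        exact List.filter_congr (fun a _ => by rw [Bool.and_comm])
      · have hx' : p x = false := by simpa using hx
        rw [List.filter_cons_of_neg (by simp [hx']), pvDD,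
          List.filter_cons_of_neg (by simp [hx']), ← ihn _ hf]
        apply congrArg pvDD
        rw [List.filter_filter]
        apply List.filter_congr
        intro a _
        by_cases ha : a = x
        · subst ha; simp [hx']
        · simp [ha]

lemma dedup_eq_pvDD (xs : List String) : PySem.List.dedup xs = pvDD xs := by
  have h : PySem.List.dedup xs = xs.foldl pvStep [] := rfl
  rw [h, foldl_pvStep]
  simp

lemma pvCircle_pairwise_key : pvCircle.Pairwise (fun a b => pvKey a < pvKey b) := by decide

lemma pvKey_lt_length : ∀ x ∈ pvCircle, pvKey x < pvCircle.length := by decide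

lemma pvKey_not_mem {x : String} (h : x ∉ pvCircle) : pvKey x = pvCircle.length := by
  unfold pvKey
  rw [(PySem.List.index?_eq_none_iff _ _).2 h]
  rfl

lemma pvKey_le {x : String} : pvKey x ≤ pvCircle.length := by
  by_cases h : x ∈ pvCircle
  · exact Nat.le_of_lt (pvKey_lt_length x h)
  · exact Nat.le_of_eq (pvKey_not_mem h)

-- inserting x into a strictly key-sorted block l followed by a strictly-greater block E
lemma insert_split (x : String) (l : List String) :
    ∀ E : List String, l.Pairwise (fun a b => pvKey a < pvKey b) →
    (∀ y ∈ l, pvKey y ≠ pvKey x) → (∀ y ∈ E, pvKey x < pvKey y) →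
    PySem.List.insertBy (fun a b => decide (pvKey a < pvKey b)) x (l ++ E) =
      l.filter (fun y => decide (pvKey y < pvKey x)) ++
        x :: (l.filter (fun y => decide (pvKey x < pvKey y)) ++ E) := by
  induction l with
  | nil =>
    intro E _ _ hE
    cases E with
    | nil => simp [PySem.List.insertBy]
    | cons e E' =>
      have he : decide (pvKey x < pvKey e) = true := by
        simpa using hE e (by simp)
      simp [PySem.List.insertBy, he]
  | cons y l' ih =>
    intro E hpw hne hE
    have hy : ∀ a ∈ l', pvKey y < pvKey a := (List.pairwise_cons.1 hpw).1
    have hpw' : l'.Pairwise (fun a b => pvKey a < pvKey b) := (List.pairwise_cons.1 hpw).2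
    rcases Nat.lt_or_ge (pvKey y) (pvKey x) with hlt | hge
    · have hb : decide (pvKey x < pvKey y) = false := by simp; omega
      have : PySem.List.insertBy (fun a b => decide (pvKey a < pvKey b)) x ((y :: l') ++ E) =
          y :: PySem.List.insertBy (fun a b => decide (pvKey a < pvKey b)) x (l' ++ E) := by
        simp [PySem.List.insertBy, hb]
      rw [this, ih E hpw' (fun a ha => hne a (by simp [ha])) hE]
      rw [List.filter_cons_of_pos (by simpa using hlt), List.filter_cons_of_neg (by simp [hb])]
      rfl
    · have hxy : pvKey x < pvKey y :=
        Nat.lt_of_le_of_ne hge (fun hh => hne y (by simp) hh.symm)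
      have hb : decide (pvKey x < pvKey y) = true := by simpa using hxy
      have h1 : (y :: l').filter (fun y => decide (pvKey y < pvKey x)) = [] := by
        rw [List.filter_eq_nil_iff]
        intro a ha
        rcases List.mem_cons.1 ha with h | h
        · subst h; simp; omega
        · have := hy a h; simp; omega
      have h2 : (y :: l').filter (fun y => decide (pvKey x < pvKey y)) = y :: l' := by
        rw [List.filter_eq_self]
        intro a ha
        rcases List.mem_cons.1 ha with h | h
        · subst h; simpa using hxy
        · have := hy a h; simp; omega
      have : PySem.List.insertBy (fun a b => decide (pvKey a < pvKey b)) x ((y :: l') ++ E) =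
          x :: (y :: l') ++ E := by
        simp [PySem.List.insertBy, hb]
      rw [this, h1, h2]
      simp

lemma sorted_target : ∀ u : List String, u.Nodup →
    PySem.List.sorted u pvKey = pvTarget u := by
  intro u
  induction u using List.reverseRecOn with
  | nil => intro _; simp [pvTarget, PySem.List.sorted_eq_foldl_insertBy]
  | append_singleton p x ih =>
    intro hnd
    have hx : x ∉ p := by
      rcases List.nodup_append.1 hnd with ⟨_, _, hdisj⟩
      intro hmem
      exact hdisj x hmem x (by simp) rfl
    have hpnd : p.Nodup := (List.nodup_append.1 hnd).1
    have hpx : p.contains x = false := by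
      simpa using (fun h => hx (List.contains_iff_mem.1 h))
    rw [PySem.List.sorted_eq_foldl_insertBy, List.foldl_append,
      ← PySem.List.sorted_eq_foldl_insertBy, ih hpnd]
    simp only [List.foldl_cons, List.foldl_nil]
    by_cases hc : x ∈ pvCircle
    · -- x is a circle note: it slots into the circle block at its index
      obtain ⟨pre, suf, hsplit⟩ := List.append_of_mem hc
      have hpw := pvCircle_pairwise_key
      rw [hsplit, List.pairwise_append] at hpw
      obtain ⟨hpre, hxsuf, hcross⟩ := hpw
      have hsuf : ∀ a ∈ suf, pvKey x < pvKey a := (List.pairwise_cons.1 hxsuf).1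
      have hprex : ∀ a ∈ pre, pvKey a < pvKey x := fun a ha => hcross a ha x (by simp)
      -- C(p) split around x
      have hCsplit : pvCircle.filter (fun c => p.contains c) =
          pre.filter (fun c => p.contains c) ++ suf.filter (fun c => p.contains c) := by
        rw [hsplit, List.filter_append, List.filter_cons_of_neg (by simp; exact hx)]
      rw [pvTarget, hCsplit, List.append_assoc]
      rw [insert_split]
      · -- assemble both sides
        have hf1 : (pre.filter (fun c => p.contains c)).filter
            (fun y => decide (pvKey y < pvKey x)) = pre.filter (fun c => p.contains c) := by
          rw [List.filter_eq_self]
          intro a ha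
          have := hprex a (List.mem_filter.1 ha).1
          simpa using this
        have hf2 : (pre.filter (fun c => p.contains c)).filter
            (fun y => decide (pvKey x < pvKey y)) = [] := by
          rw [List.filter_eq_nil_iff]
          intro a ha
          have := hprex a (List.mem_filter.1 ha).1
          simp; omega
        rw [hf1, hf2, List.nil_append]
        -- the target side
        rw [pvTarget, hsplit]
        have hpreq : ∀ a ∈ pre, ((p ++ [x]).contains a) = p.contains a := by
          intro a ha
          simp only [List.contains_append, List.contains_cons, List.contains_nil]
          have : (a == x) = false := by
            simp
            intro he
            subst he
            exact absurd (hprex a ha) (lt_irrefl _)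
          rw [this]
          simp
        have hsufq : ∀ a ∈ suf, ((p ++ [x]).contains a) = p.contains a := by
          intro a ha
          simp only [List.contains_append, List.contains_cons, List.contains_nil]
          have : (a == x) = false := by
            simp
            intro he
            subst he
            exact absurd (hsuf _ ha) (lt_irrefl _)
          rw [this]
          simp
        rw [List.filter_append, List.filter_cons_of_pos (by simp [List.contains_append]),
          List.filter_congr hpreq, List.filter_congr hsufq,
          List.filter_append (l₁ := p) (l₂ := [x]),
          List.filter_cons_of_neg (by simp [List.contains_append]), List.filter_nil,
          List.append_nil]
        have he1 : List.filter p.contains pre = List.filter (fun c => decide (c ∈ p)) pre :=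
          List.filter_congr (fun a _ => by simp [List.contains_eq_mem])
        have he2 : List.filter p.contains suf = List.filter (fun c => decide (c ∈ p)) suf :=
          List.filter_congr (fun a _ => by simp [List.contains_eq_mem])
        simp [he1, he2]
      · exact hpre.filter _
      · -- keys in the pre-block are strictly below pvKey x
        intro y hy
        exact Nat.ne_of_lt (hprex y (List.mem_filter.1 hy).1)
      · -- everything after the insertion point has key above pvKey x
        intro y hy
        rcases List.mem_append.1 hy with h | h
        · exact hsuf y (List.mem_filter.1 h).1
        · have hyn : ¬ y ∈ pvCircle := by
            have := (List.mem_filter.1 h).2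
            simpa using this
          rw [pvKey_not_mem hyn]
          exact pvKey_lt_length x hc
    · -- x is not a circle note: it is appended at the very end
      have hkx : pvKey x = pvCircle.length := pvKey_not_mem hc
      rw [PySem.List.insertBy_of_forall_not_before]
      · rw [pvTarget, pvTarget]
        have hCeq : pvCircle.filter (fun c => (p ++ [x]).contains c) =
            pvCircle.filter (fun c => p.contains c) := by
          apply List.filter_congr
          intro a ha
          simp [List.contains_append]
          intro hh
          have : a = x := by simpa using hh
          subst this
          exact absurd ha hc
        rw [hCeq, List.filter_append, List.filter_cons_of_pos (by simpa using hc),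
          List.filter_nil, List.append_assoc]
      · intro y hy
        rw [pvTarget] at hy
        have : pvKey y ≤ pvKey x := by
          rw [hkx]
          exact pvKey_le
        simp
        omega

lemma A_eq_target (notes : List String) :
    build_root_order_py notes = pvTarget (PySem.List.dedup notes) := by
  by_cases h : notes.isEmpty
  · have hn : notes = [] := by simpa using h
    subst hn
    simp [build_root_order_py, pvTarget]
  · rw [build_root_order_py, if_neg h]
    show notes.foldl pvStep (pvCircle.filter fun note => notes.contains note) = _
    rw [foldl_pvStep]
    have hstep1 : notes.filter
        (fun n => !(pvCircle.filter fun note => notes.contains note).contains n) =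
        notes.filter (fun n => !pvCircle.contains n) := by
      apply List.filter_congr
      intro n hn
      have : (pvCircle.filter fun note => notes.contains note).contains n =
          pvCircle.contains n := by
        by_cases hc : n ∈ pvCircle
        · simp [List.mem_filter, hc, hn]
        · simp [List.mem_filter, hc]
      rw [this]
    rw [hstep1, pvDD_filter _ _ _ (Nat.le_refl _), ← dedup_eq_pvDD]
    have hstep2 : (pvCircle.filter fun note => notes.contains note) =
        pvCircle.filter (fun c => (PySem.List.dedup notes).contains c) := by
      apply List.filter_congr
      intro c _
      by_cases hc : c ∈ notes
      · simp [List.contains_iff_mem, hc]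
      · simp [List.contains_iff_mem, hc]
    rw [hstep2]
    rfl

-- ===== VERDICT (by name: the statement is the Claim_ definition above) =====
theorem build_root_order_py_spec : Claim_equal_build_root_order_py := by
  intro notes _
  unfold Spec_build_root_order_py
  rw [A_eq_target]
  show pvTarget (PySem.List.dedup notes) = PySem.List.sorted (PySem.List.dedup notes) pvKey
  exact (sorted_target _ (PySem.List.nodup_dedup notes)).symm
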